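-- pv_equiv track=rewrite | github.com/PixelProtogen/EzPlugin | assets/source.py | update_array
-- ===== SOURCE A (Python) =====
-- def update_array(array,index,value):
--     newarray=[]
--     indx=-1
--     for v in array:
--         indx=indx+1
--         if (indx==index):
--             newarray.append(value)
--         else:
--             newarray.append(v)
--     return newarray
-- ===== SOURCE B (Python) =====
-- def update_array(array, index, value):
--     new = list(array)
--     if 0 <= index < len(array):
--         new[index] = value
--     return new
-- ===== Notes on version B (the rewrite author's own statement) =====
-- stated objective: idiomatic
-- what changed: Replaces A's per-element counter loop with a bulk copy followed by one guarded in-place overwrite at the index.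
import Mathlib
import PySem

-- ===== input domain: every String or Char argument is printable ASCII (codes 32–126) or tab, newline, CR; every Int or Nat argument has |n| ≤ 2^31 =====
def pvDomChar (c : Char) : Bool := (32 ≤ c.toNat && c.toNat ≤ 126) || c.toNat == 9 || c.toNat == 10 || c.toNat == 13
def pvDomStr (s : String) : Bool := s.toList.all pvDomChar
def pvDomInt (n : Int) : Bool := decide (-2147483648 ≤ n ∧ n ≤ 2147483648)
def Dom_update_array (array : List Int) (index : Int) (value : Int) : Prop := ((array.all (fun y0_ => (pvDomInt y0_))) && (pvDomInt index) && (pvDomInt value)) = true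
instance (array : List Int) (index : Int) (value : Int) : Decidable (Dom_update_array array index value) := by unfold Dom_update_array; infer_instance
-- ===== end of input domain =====

-- B replaces A's per-element counter loop by a bulk copy plus one guarded overwrite (idiomatic).


-- ===== PORT A =====
-- the for-loop over `array` with counter `indx`, appending via cons-recursion
def updateArrayLoop : List Int → Int → Int → Int → List Int
  | [], _, _, _ => []
  | v :: rest, indx, index, value =>
      let indx := indx + 1
      (if indx == index then value else v) :: updateArrayLoop rest indx index value

def update_array (array : List Int) (index : Int) (value : Int) : List Int :=
  updateArrayLoop array (-1) index value

-- ===== PORT B =====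
def update_array_alt (array : List Int) (index : Int) (value : Int) : List Int :=
  if 0 ≤ index ∧ index < array.length then array.set index.toNat value else array

-- ===== PRECONDITION & SPEC =====
def Spec_update_array (array : List Int) (index : Int) (value : Int) (out : List Int) : Prop := out = update_array_alt array index value
instance (array : List Int) (index : Int) (value : Int) (out : List Int) : Decidable (Spec_update_array array index value out) := by unfold Spec_update_array; infer_instance

-- ===== CLAIM (what is proved, stated in full; the proofs are below) =====
def Claim_equal_update_array : Prop := ∀ (array : List Int) (index : Int) (value : Int), Dom_update_array array index value → Spec_update_array array index value (update_array array index value)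

-- ===== LEMMAS AND PROOFS =====
theorem updateArrayLoop_eq (array : List Int) :
    ∀ (k index value : Int),
      updateArrayLoop array k index value = update_array_alt array (index - (k + 1)) value := by
  induction array with
  | nil => intro k index value; simp [updateArrayLoop, update_array_alt]
  | cons v rest ih =>
    intro k index value
    simp only [updateArrayLoop, ih (k + 1) index value]
    unfold update_array_alt
    by_cases h0 : index - (k + 1) = 0
    · have : (k + 1) == index := by simp [show index = k + 1 by omega]
      simp [this, h0]
      omega
    · by_cases hin : 0 ≤ index - (k + 1) ∧ index - (k + 1) < (v :: rest).length
      · have hne : ((k + 1) == index) = false := by simp; omega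
        have h1 : 0 ≤ index - (k + 1 + 1) ∧ index - (k + 1 + 1) < rest.length := by
          simp at hin ⊢; omega
        simp only [hne, Bool.false_eq_true, if_pos hin, if_pos h1]
        have ht : (index - (k + 1)).toNat = (index - (k + 1 + 1)).toNat + 1 := by omega
        simp [ht]
      · have hne : ((k + 1) == index) = false := by
          simp at hin ⊢; omega
        have h1 : ¬ (0 ≤ index - (k + 1 + 1) ∧ index - (k + 1 + 1) < (rest.length : Int)) := by
          simp at hin; omega
        have hin' : ¬ (0 ≤ index - (k + 1) ∧ index - (k + 1) < ((v :: rest).length : Int)) := hin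
        simp only [hne, Bool.false_eq_true, if_false, if_neg h1, if_neg hin']

-- ===== VERDICT (by name: the statement is the Claim_ definition above) =====
theorem update_array_spec : Claim_equal_update_array := by
  intro array index value _
  unfold Spec_update_array update_array
  rw [updateArrayLoop_eq]
  norm_num
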